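-- pv_equiv track=rewrite | github.com/CodingThrust/problem-reductions | docs/paper/verify-reductions/adversary_exact_cover_by_3_sets_subset_product.py | is_feasible_source
-- ===== SOURCE A (Python) =====
-- def is_feasible_source(universe_size: int, subsets: list[list[int]], config: list[int]) -> bool:
--     """Check if config selects a valid exact cover."""
--     if len(config) != len(subsets):
--         return False
--     q = universe_size // 3
--     if sum(config) != q:
--         return False
--     covered = set()
--     for idx in range(len(config)):
--         if config[idx] == 1:
--             for elem in subsets[idx]:
--                 if elem in covered:
--                     return False
--                 covered.add(elem)
--     return covered == set(range(universe_size))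
-- ===== SOURCE B (Python) =====
-- def is_feasible_source(universe_size: int, subsets: list[list[int]], config: list[int]) -> bool:
--     """Check if config selects a valid exact cover, by verifying that each
--     universe element is covered exactly once (transposed, per-element scan)."""
--     if len(config) != len(subsets):
--         return False
--     if sum(config) != universe_size // 3:
--         return False
--     chosen = [s for s, bit in zip(subsets, config) if bit == 1]
--     total = sum(len(s) for s in chosen)
--     rng = range(universe_size)
--     return total == len(rng) and all(
--         sum(s.count(e) for s in chosen) == 1 for e in rng)
-- ===== Notes on version B (the rewrite author's own statement) =====
-- stated objective: alternative
-- what changed: Replaces A's one-pass scan with a growing `covered` set (per-element membership test, early return on a duplicate, final set equality) by a transposed per-universe-element verification: no set at all - for each e in range(universe_size) it counts e's occurrences across the chosen subsets and demands exactly 1, plus a total-size check that rules out elements outside the universe; correct by pigeonhole.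
import Mathlib
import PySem

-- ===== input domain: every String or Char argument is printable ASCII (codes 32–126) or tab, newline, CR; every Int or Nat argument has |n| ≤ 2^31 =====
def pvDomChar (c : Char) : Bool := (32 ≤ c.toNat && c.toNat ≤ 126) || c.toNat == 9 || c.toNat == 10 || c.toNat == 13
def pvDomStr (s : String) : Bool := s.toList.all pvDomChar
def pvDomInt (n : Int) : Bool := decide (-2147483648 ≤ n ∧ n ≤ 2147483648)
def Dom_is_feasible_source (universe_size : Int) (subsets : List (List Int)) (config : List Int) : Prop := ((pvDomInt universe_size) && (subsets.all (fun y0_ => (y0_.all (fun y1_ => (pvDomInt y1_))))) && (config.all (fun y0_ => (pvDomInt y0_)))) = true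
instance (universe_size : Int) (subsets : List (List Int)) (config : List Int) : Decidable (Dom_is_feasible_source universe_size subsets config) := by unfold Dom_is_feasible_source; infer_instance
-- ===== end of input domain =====

-- B replaces A's one-pass scan with a growing `covered` set (membership test per element,
-- early return on a duplicate, final set equality) by a transposed per-universe-element
-- verification: for each e in range(universe_size) it counts e's occurrences across the
-- chosen subsets and demands exactly 1, plus a total-size check (no set is built at all).

-- ===== PORT A =====
-- inner loop of A: 'for elem in subsets[idx]: if elem in covered: return False; covered.add(elem)'
def isfInner (covered : PySem.Set Int) : List Int → Option (PySem.Set Int)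
  | [] => some covered
  | e :: es =>
    if PySem.Set.contains covered e then none
    else isfInner (PySem.Set.add covered e) es

-- outer loop of A: 'for idx in range(len(config)): if config[idx] == 1: <inner>'
def isfLoop (subsets : List (List Int)) (config : List Int) (idx : Nat)
    (covered : PySem.Set Int) : Option (PySem.Set Int) :=
  if _h : idx < config.length then
    if PySem.List.pyGetD config (idx : Int) 0 = 1 then
      match isfInner covered (PySem.List.pyGetD subsets (idx : Int) []) with
      | none => none
      | some c => isfLoop subsets config (idx + 1) c
    else isfLoop subsets config (idx + 1) covered
  else some covered
termination_by config.length - idx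

def is_feasible_source (universe_size : Int) (subsets : List (List Int)) (config : List Int) : Bool :=
  if PySem.List.len config ≠ PySem.List.len subsets then false
  else if config.sum ≠ PySem.Int.floordiv universe_size 3 then false
  else
    match isfLoop subsets config 0 PySem.Set.empty with
    | none => false
    | some covered =>
      PySem.Set.equal covered (PySem.Set.ofList (PySem.List.pyRange 0 universe_size 1))

-- ===== PORT B =====
def is_feasible_source_alt (universe_size : Int) (subsets : List (List Int)) (config : List Int) : Bool :=
  if PySem.List.len config ≠ PySem.List.len subsets then false
  else if config.sum ≠ PySem.Int.floordiv universe_size 3 then false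
  else
    let chosen := ((subsets.zip config).filter (fun p => p.2 == 1)).map (fun p => p.1)
    let total := (chosen.map (fun s => PySem.List.len s)).sum
    let rng := PySem.List.pyRange 0 universe_size 1
    total == PySem.List.len rng
      && rng.all (fun e => (chosen.map (fun s => ((PySem.List.count s e : Nat) : Int))).sum == 1)

-- ===== PRECONDITION & SPEC =====
def Spec_is_feasible_source (universe_size : Int) (subsets : List (List Int)) (config : List Int) (out : Bool) : Prop := out = is_feasible_source_alt universe_size subsets config
instance (universe_size : Int) (subsets : List (List Int)) (config : List Int) (out : Bool) : Decidable (Spec_is_feasible_source universe_size subsets config out) := by unfold Spec_is_feasible_source; infer_instance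

-- ===== CLAIM (what is proved, stated in full; the proofs are below) =====
def Claim_equal_is_feasible_source : Prop := ∀ (universe_size : Int) (subsets : List (List Int)) (config : List Int), Dom_is_feasible_source universe_size subsets config → Spec_is_feasible_source universe_size subsets config (is_feasible_source universe_size subsets config)

-- ===== LEMMAS AND PROOFS =====

-- the selected subsets (B's `chosen`) and their flattening
def chosenOf (subsets : List (List Int)) (config : List Int) : List (List Int) :=
  ((subsets.zip config).filter (fun p => p.2 == 1)).map (fun p => p.1)

def flatSel (subsets : List (List Int)) (config : List Int) : List Int :=
  (chosenOf subsets config).flatten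

lemma flatSel_cons (s : List Int) (ss : List (List Int)) (c : Int) (cs : List Int) :
    flatSel (s :: ss) (c :: cs) =
      if c = 1 then s ++ flatSel ss cs else flatSel ss cs := by
  by_cases h : c = 1 <;> simp [flatSel, chosenOf, h]

lemma isfInner_append (l1 l2 : List Int) :
    ∀ c, isfInner c (l1 ++ l2) = (isfInner c l1).bind (fun c' => isfInner c' l2) := by
  induction l1 with
  | nil => intro c; simp [isfInner]
  | cons e es ih =>
    intro c
    simp only [List.cons_append, isfInner]
    split <;> simp [ih]

-- A's inner loop succeeds iff the elements are fresh and pairwise distinct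
lemma isfInner_spec (l : List Int) :
    ∀ c : PySem.Set Int,
      isfInner c l = if l.Nodup ∧ ∀ x ∈ l, x ∉ c then some (c ++ l) else none := by
  induction l with
  | nil => intro c; simp [isfInner]
  | cons e es ih =>
    intro c
    rw [show isfInner c (e :: es)
        = if PySem.Set.contains c e then none else isfInner (PySem.Set.add c e) es from rfl]
    by_cases he : e ∈ c
    · rw [if_pos ((PySem.Set.contains_iff c e).mpr he), if_neg]
      rintro ⟨-, hall⟩
      exact hall e (by simp) he
    · rw [if_neg (by simp [he]), PySem.Set.add_of_not_mem he, ih]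
      have hiff : (es.Nodup ∧ ∀ x ∈ es, x ∉ c ++ [e])
          ↔ ((e :: es).Nodup ∧ ∀ x ∈ e :: es, x ∉ c) := by
        constructor
        · rintro ⟨hnd, hall⟩
          refine ⟨List.nodup_cons.mpr ⟨fun hm => hall e hm (by simp), hnd⟩, ?_⟩
          intro x hx hxc
          rcases List.mem_cons.mp hx with rfl | hx
          · exact he hxc
          · exact hall x hx (by simp [hxc])
        · rintro ⟨hnd, hall⟩
          refine ⟨(List.nodup_cons.mp hnd).2, ?_⟩
          intro x hx hm
          rcases List.mem_append.mp hm with hm | hm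
          · exact hall x (by simp [hx]) hm
          · have hxe : x = e := by simpa using hm
            exact (List.nodup_cons.mp hnd).1 (hxe ▸ hx)
      exact if_congr hiff (by simp) rfl

-- A's outer loop from index idx is the inner loop run on the flattened tail selection
lemma isfLoop_eq (subsets : List (List Int)) (config : List Int)
    (hlen : config.length = subsets.length) (idx : Nat) (covered : PySem.Set Int) :
    isfLoop subsets config idx covered =
      isfInner covered (flatSel (subsets.drop idx) (config.drop idx)) := by
  by_cases hlt : idx < config.length
  · have hlt' : idx < subsets.length := hlen ▸ hlt
    have hdc : config.drop idx = config[idx] :: config.drop (idx + 1) :=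
      List.drop_eq_getElem_cons hlt
    have hds : subsets.drop idx = subsets[idx] :: subsets.drop (idx + 1) :=
      List.drop_eq_getElem_cons hlt'
    have hgc : PySem.List.pyGetD config (idx : Int) 0 = config[idx] := by
      rw [PySem.List.pyGetD_natCast]; exact List.getD_eq_getElem _ _ hlt
    have hgs : PySem.List.pyGetD subsets (idx : Int) [] = subsets[idx] := by
      rw [PySem.List.pyGetD_natCast]; exact List.getD_eq_getElem _ _ hlt'
    rw [isfLoop, dif_pos hlt, hgc, hgs, hdc, hds, flatSel_cons]
    by_cases hone : config[idx] = 1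
    · rw [if_pos hone, if_pos hone, isfInner_append]
      cases h : isfInner covered subsets[idx] with
      | none => simp
      | some c => simpa using isfLoop_eq subsets config hlen (idx + 1) c
    · rw [if_neg hone, if_neg hone]
      exact isfLoop_eq subsets config hlen (idx + 1) covered
  · have h1 : config.drop idx = [] := List.drop_eq_nil_of_le (by omega)
    have h2 : subsets.drop idx = [] := List.drop_eq_nil_of_le (by omega)
    rw [isfLoop, dif_neg hlt, h1, h2]
    simp [flatSel, chosenOf, isfInner]
termination_by config.length - idx

-- a list is a permutation of a duplicate-free list r iff it has r's length
-- and contains every element of r exactly once (the pigeonhole bridge)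
lemma perm_char (l r : List Int) (hr : r.Nodup) :
    l.Perm r ↔ (l.length = r.length ∧ ∀ e ∈ r, l.count e = 1) := by
  constructor
  · intro h
    exact ⟨h.length_eq, fun e he => by
      rw [h.count_eq]; exact List.count_eq_one_of_mem hr he⟩
  · rintro ⟨hlen, hcnt⟩
    have hsub : r.Subperm l := hr.subperm (fun e he => by
      have := hcnt e he
      exact List.count_pos_iff.mp (by omega))
    exact (hsub.perm_of_length_le (by omega)).symm

-- sum of the chosen subsets' lengths = length of their concatenation
lemma sum_len (ch : List (List Int)) :
    (ch.map (fun s => PySem.List.len s)).sum = (ch.flatten.length : Int) := by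
  induction ch with
  | nil => simp
  | cons s t ih =>
    simp only [List.map_cons, List.sum_cons, List.flatten_cons, List.length_append]
    push_cast
    rw [← ih]
    simp [PySem.List.len]

-- sum of e's counts over the chosen subsets = e's count in their concatenation
lemma sum_count (e : Int) (ch : List (List Int)) :
    (ch.map (fun s => ((PySem.List.count s e : Nat) : Int))).sum = (ch.flatten.count e : Int) := by
  induction ch with
  | nil => simp [PySem.List.count]
  | cons s t ih =>
    simp only [PySem.List.count] at ih ⊢
    simp only [List.map_cons, List.sum_cons, List.flatten_cons, List.count_append, ih]
    push_cast
    ring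

theorem isf_eq (universe_size : Int) (subsets : List (List Int)) (config : List Int) :
    is_feasible_source universe_size subsets config
      = is_feasible_source_alt universe_size subsets config := by
  unfold is_feasible_source is_feasible_source_alt
  by_cases h1 : PySem.List.len config ≠ PySem.List.len subsets
  · rw [if_pos h1, if_pos h1]
  · rw [if_neg h1, if_neg h1]
    by_cases h2 : config.sum ≠ PySem.Int.floordiv universe_size 3
    · rw [if_pos h2, if_pos h2]
    · rw [if_neg h2, if_neg h2]
      have hlen : config.length = subsets.length := by
        have := not_not.mp h1
        simpa [PySem.List.len] using this
      have hloop := isfLoop_eq subsets config hlen 0 PySem.Set.empty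
      simp only [List.drop_zero] at hloop
      rw [hloop, isfInner_spec]
      have hr : (PySem.List.pyRange 0 universe_size 1).Nodup :=
        PySem.List.nodup_pyRange_one 0 universe_size
      show (match (if (flatSel subsets config).Nodup
              ∧ ∀ x ∈ flatSel subsets config, x ∉ PySem.Set.empty then
              some (PySem.Set.empty ++ flatSel subsets config)
            else none : Option (PySem.Set Int)) with
          | none => false
          | some covered => PySem.Set.equal covered
              (PySem.Set.ofList (PySem.List.pyRange 0 universe_size 1)))
        = (((chosenOf subsets config).map (fun s => PySem.List.len s)).sum
              == PySem.List.len (PySem.List.pyRange 0 universe_size 1)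
            && (PySem.List.pyRange 0 universe_size 1).all (fun e =>
              ((chosenOf subsets config).map (fun s => ((PySem.List.count s e : Nat) : Int))).sum == 1))
      rw [PySem.Set.ofList_eq_self_of_nodup _ hr]
      simp only [sum_len, sum_count, flatSel]
      set r := PySem.List.pyRange 0 universe_size 1 with hrdef
      set L := (chosenOf subsets config).flatten with hLdef
      by_cases hperm : L.Perm r
      · obtain ⟨hle, hce⟩ := (perm_char L r hr).mp hperm
        have hnd : L.Nodup := hperm.nodup_iff.mpr hr
        rw [if_pos ⟨hnd, by simp [PySem.Set.empty]⟩]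
        show PySem.Set.equal (PySem.Set.empty ++ L) r = _
        have hA : PySem.Set.equal (PySem.Set.empty ++ L) r = true := by
          rw [PySem.Set.equal_iff]
          intro x; simpa [PySem.Set.empty] using hperm.mem_iff
        have hB1 : ((L.length : Int) == PySem.List.len r) = true := by
          simp [PySem.List.len, hle]
        have hB2 : r.all (fun e => ((L.count e : Nat) : Int) == 1) = true := by
          rw [List.all_eq_true]
          intro e he
          simp [hce e he]
        rw [hA, hB1, hB2]; rfl
      · have hBfalse : (((L.length : Int) == PySem.List.len r)
            && r.all (fun e => ((L.count e : Nat) : Int) == 1)) = false := by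
          by_contra hcon
          simp only [Bool.not_eq_false, Bool.and_eq_true, beq_iff_eq, List.all_eq_true] at hcon
          obtain ⟨hb1, hb2⟩ := hcon
          apply hperm
          refine (perm_char L r hr).mpr ⟨?_, ?_⟩
          · have : (L.length : Int) = (r.length : Int) := by
              simpa [PySem.List.len] using hb1
            exact_mod_cast this
          · intro e he
            exact_mod_cast hb2 e he
        rw [hBfalse]
        by_cases hnd : L.Nodup
        · rw [if_pos ⟨hnd, by simp [PySem.Set.empty]⟩]
          show PySem.Set.equal (PySem.Set.empty ++ L) r = false
          rw [Bool.eq_false_iff]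
          intro hA
          rw [PySem.Set.equal_iff] at hA
          exact hperm ((List.perm_ext_iff_of_nodup hnd hr).mpr (by
            intro x; simpa [PySem.Set.empty] using hA x))
        · rw [if_neg (fun hcon => hnd hcon.1)]

-- ===== VERDICT (by name: the statement is the Claim_ definition above) =====
theorem is_feasible_source_spec : Claim_equal_is_feasible_source := by
  intro u ss cfg _
  exact isf_eq u ss cfg
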